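-- pv_equiv track=rewrite | github.com/juy4556/PythonAlgorithm | 잡동/ao/4.py | comb_now_and_discarded
-- ===== SOURCE A (Python) =====
-- def comb_now_and_discarded(discarded, goal, now):
--     ended = False
--     now_length = len(now)
--     discarded_length = len(discarded)
--     for i in range(now_length):
--         for j in range(discarded_length):
--             if now[i] + discarded[j] == goal:
--                 ended = True
--                 now.pop(i)
--                 discarded.pop(j)
--                 return ended
--
--     return ended
-- ===== SOURCE B (Python) =====
-- def comb_now_and_discarded(discarded, goal, now):
--     a = sorted(now)
--     b = sorted(discarded, reverse=True)
--     i, j = 0, 0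
--     while i < len(a) and j < len(b):
--         s = a[i] + b[j]
--         if s == goal:
--             return True
--         if s < goal:
--             i += 1
--         else:
--             j += 1
--     return False
-- ===== Notes on version B (the rewrite author's own statement) =====
-- stated objective: alternative
-- what changed: Replaces the nested scan with the two-pointer pair-sum algorithm: sort now ascending and discarded descending, then advance one pointer per step depending on whether the current sum is below or above goal; B does not mutate its arguments (equivalence is about the return value).
import Mathlib
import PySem

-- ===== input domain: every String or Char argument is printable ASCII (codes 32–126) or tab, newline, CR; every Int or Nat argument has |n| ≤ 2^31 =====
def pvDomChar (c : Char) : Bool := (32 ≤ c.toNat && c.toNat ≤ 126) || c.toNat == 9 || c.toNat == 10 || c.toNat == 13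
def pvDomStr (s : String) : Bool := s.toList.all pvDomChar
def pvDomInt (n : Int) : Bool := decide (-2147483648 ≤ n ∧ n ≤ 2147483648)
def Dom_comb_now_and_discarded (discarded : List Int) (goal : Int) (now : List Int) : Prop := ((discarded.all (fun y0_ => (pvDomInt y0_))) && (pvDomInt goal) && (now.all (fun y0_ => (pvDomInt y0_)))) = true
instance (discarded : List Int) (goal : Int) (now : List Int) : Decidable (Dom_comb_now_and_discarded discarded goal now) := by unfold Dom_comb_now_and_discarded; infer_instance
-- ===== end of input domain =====

-- B answers "some x in now and d in discarded sum to goal" by the two-pointer scan over sorted copies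
-- (now ascending, discarded descending) instead of A's nested scan. A pops the matched elements from
-- its argument lists; B does not mutate: the equivalence proved here is about the return value only.


-- ===== PORT A =====
-- inner 'for j in range(discarded_length)': scan discarded, return True on a match
def combA_inner (x goal : Int) (ds : List Int) : Bool :=
  match ds with
  | [] => false
  | d :: t => if x + d = goal then true else combA_inner x goal t

-- outer 'for i in range(now_length)'
def combA_outer (discarded : List Int) (goal : Int) (ns : List Int) : Bool :=
  match ns with
  | [] => false
  | x :: t => if combA_inner x goal discarded then true else combA_outer discarded goal t

def comb_now_and_discarded (discarded : List Int) (goal : Int) (now : List Int) : Bool :=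
  combA_outer discarded goal now

-- ===== PORT B =====
-- the 'while i < len(a) and j < len(b)' two-pointer loop; advancing a pointer = dropping a head
def combB_tp (goal : Int) : List Int → List Int → Bool
  | [], _ => false
  | _ :: _, [] => false
  | x :: a, y :: b =>
      if x + y = goal then true
      else if x + y < goal then combB_tp goal a (y :: b)
      else combB_tp goal (x :: a) b
termination_by a b => a.length + b.length

def comb_now_and_discarded_alt (discarded : List Int) (goal : Int) (now : List Int) : Bool :=
  combB_tp goal (PySem.List.sorted now (fun v => v) false)
               (PySem.List.sorted discarded (fun v => v) true)

-- ===== PRECONDITION & SPEC =====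
def Spec_comb_now_and_discarded (discarded : List Int) (goal : Int) (now : List Int) (out : Bool) : Prop := out = comb_now_and_discarded_alt discarded goal now
instance (discarded : List Int) (goal : Int) (now : List Int) (out : Bool) : Decidable (Spec_comb_now_and_discarded discarded goal now out) := by unfold Spec_comb_now_and_discarded; infer_instance

-- ===== CLAIM =====
def Claim_equal_comb_now_and_discarded : Prop := ∀ (discarded : List Int) (goal : Int) (now : List Int), Dom_comb_now_and_discarded discarded goal now → Spec_comb_now_and_discarded discarded goal now (comb_now_and_discarded discarded goal now)

-- ===== LEMMAS AND PROOFS =====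
theorem combA_inner_iff (x goal : Int) (ds : List Int) :
    combA_inner x goal ds = true ↔ ∃ d ∈ ds, x + d = goal := by
  induction ds with
  | nil => simp [combA_inner]
  | cons d t ih =>
      simp only [combA_inner, List.mem_cons]
      split_ifs with h
      · simp only [true_iff]; exact ⟨d, Or.inl rfl, h⟩
      · simp only [ih]
        constructor
        · rintro ⟨e, he, hs⟩; exact ⟨e, Or.inr he, hs⟩
        · rintro ⟨e, he | he, hs⟩
          · exact absurd (he ▸ hs) h
          · exact ⟨e, he, hs⟩

theorem combA_outer_iff (discarded : List Int) (goal : Int) (ns : List Int) :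
    combA_outer discarded goal ns = true ↔ ∃ x ∈ ns, ∃ d ∈ discarded, x + d = goal := by
  induction ns with
  | nil => simp [combA_outer]
  | cons x t ih =>
      simp only [combA_outer, List.mem_cons]
      split_ifs with h
      · simp only [true_iff]
        obtain ⟨d, hd, hs⟩ := (combA_inner_iff x goal discarded).mp h
        exact ⟨x, Or.inl rfl, d, hd, hs⟩
      · simp only [ih]
        constructor
        · rintro ⟨y, hy, d, hd, hs⟩; exact ⟨y, Or.inr hy, d, hd, hs⟩
        · rintro ⟨y, hy | hy, d, hd, hs⟩
          · exact absurd ((combA_inner_iff x goal discarded).mpr ⟨d, hd, hy ▸ hs⟩) h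
          · exact ⟨y, hy, d, hd, hs⟩

-- two-pointer correctness on an ascending a and a descending b
theorem combB_tp_iff (goal : Int) (a b : List Int)
    (ha : a.Pairwise (· ≤ ·)) (hb : b.Pairwise (fun p q => q ≤ p)) :
    combB_tp goal a b = true ↔ ∃ x ∈ a, ∃ y ∈ b, x + y = goal := by
  fun_induction combB_tp goal a b with
  | case1 b => simp
  | case2 x a => simp
  | case3 x a y b heq => simp only [true_iff]; exact ⟨x, List.mem_cons_self, y, List.mem_cons_self, heq⟩
  | case4 x a y b hne hlt ih =>
      rw [ih (List.Pairwise.of_cons ha) hb]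
      constructor
      · rintro ⟨x', hx', w⟩; exact ⟨x', List.mem_cons_of_mem _ hx', w⟩
      · rintro ⟨x', hx', y', hy', hs⟩
        rcases List.mem_cons.mp hx' with hx0 | hxt
        · -- x' = x: every y' in y::b satisfies y' ≤ y, so x + y' < goal, contradiction
          subst hx0
          have hy'le : y' ≤ y := by
            rcases List.mem_cons.mp hy' with hy0 | hyt
            · exact le_of_eq hy0
            · exact (List.pairwise_cons.mp hb).1 y' hyt
          exact absurd hs (by omega)
        · exact ⟨x', hxt, y', hy', hs⟩
  | case5 x a y b hne hge ih =>
      rw [ih ha (List.Pairwise.of_cons hb)]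
      constructor
      · rintro ⟨x', hx', y', hy', hs⟩; exact ⟨x', hx', y', List.mem_cons_of_mem _ hy', hs⟩
      · rintro ⟨x', hx', y', hy', hs⟩
        rcases List.mem_cons.mp hy' with hy0 | hyt
        · -- y' = y: every x' in x::a satisfies x ≤ x', so x' + y > goal, contradiction
          subst hy0
          have hx'ge : x ≤ x' := by
            rcases List.mem_cons.mp hx' with hx0 | hxt
            · exact le_of_eq hx0.symm
            · exact (List.pairwise_cons.mp ha).1 x' hxt
          exact absurd hs (by omega)
        · exact ⟨x', hx', y', hyt, hs⟩

-- ===== VERDICT =====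
theorem comb_now_and_discarded_spec : Claim_equal_comb_now_and_discarded := by
  intro discarded goal now _
  unfold Spec_comb_now_and_discarded comb_now_and_discarded comb_now_and_discarded_alt
  rw [Bool.eq_iff_iff, combA_outer_iff,
    combB_tp_iff goal _ _ (PySem.List.sorted_pairwise now (fun v => v) )
      (PySem.List.sorted_pairwise_rev discarded (fun v => v))]
  constructor
  · rintro ⟨x, hx, d, hd, hs⟩
    exact ⟨x, (PySem.List.mem_sorted _ _ _ _).mpr hx, d, (PySem.List.mem_sorted _ _ _ _).mpr hd, hs⟩
  · rintro ⟨x, hx, d, hd, hs⟩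
    exact ⟨x, (PySem.List.mem_sorted _ _ _ _).mp hx, d, (PySem.List.mem_sorted _ _ _ _).mp hd, hs⟩
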